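-- pv_equiv track=rewrite | github.com/iChubai/nk-mmseg | utils/jt_utils.py | _convert_param_name
-- ===== SOURCE A (Python) =====
-- def _default_param_mapping():
--     """Explicit PyTorch->Jittor key mapping."""
--     return {
--         'decode_head.conv_seg.weight': 'decode_head.cls_seg.weight',
--         'decode_head.conv_seg.bias': 'decode_head.cls_seg.bias',
--         'decode_head.squeeze.bn.weight': 'decode_head.squeeze.norm.weight',
--         'decode_head.squeeze.bn.bias': 'decode_head.squeeze.norm.bias',
--         'decode_head.squeeze.bn.running_mean':
--         'decode_head.squeeze.norm.running_mean',
--         'decode_head.squeeze.bn.running_var':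
--         'decode_head.squeeze.norm.running_var',
--         'decode_head.hamburger.ham_out.bn.weight':
--         'decode_head.hamburger.ham_out.norm.weight',
--         'decode_head.hamburger.ham_out.bn.bias':
--         'decode_head.hamburger.ham_out.norm.bias',
--         'decode_head.hamburger.ham_out.bn.running_mean':
--         'decode_head.hamburger.ham_out.norm.running_mean',
--         'decode_head.hamburger.ham_out.bn.running_var':
--         'decode_head.hamburger.ham_out.norm.running_var',
--         'decode_head.align.bn.weight': 'decode_head.align.norm.weight',
--         'decode_head.align.bn.bias': 'decode_head.align.norm.bias',
--         'decode_head.align.bn.running_mean':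
--         'decode_head.align.norm.running_mean',
--         'decode_head.align.bn.running_var': 'decode_head.align.norm.running_var',
--     }
--
-- def _convert_param_name(src_key, jittor_state_dict):
--     """Convert checkpoint key to model key."""
--     if 'num_batches_tracked' in src_key:
--         return None
--     if any(x in src_key
--            for x in ['backbone.norm0', 'backbone.norm1', 'backbone.norm2',
--                      'backbone.norm3']):
--         return None
--
--     mapping = _default_param_mapping()
--     base_keys = [src_key]
--     if src_key.startswith('module.'):
--         base_keys.append(src_key[7:])
--     if src_key.startswith('backbone.'):
--         base_keys.append(src_key[9:])
--     if src_key.startswith('module.backbone.'):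
--         base_keys.append(src_key[16:])
--     if src_key.startswith('model.'):
--         base_keys.append(src_key[6:])
--     if src_key.startswith('model.backbone.'):
--         base_keys.append(src_key[15:])
--
--     candidates = []
--     for key in base_keys:
--         if key in mapping:
--             candidates.append(mapping[key])
--         candidates.append(key)
--         if 'gamma_1' in key:
--             candidates.append(key.replace('gamma_1', 'gamma1'))
--         if 'gamma_2' in key:
--             candidates.append(key.replace('gamma_2', 'gamma2'))
--         if '.bn.' in key:
--             candidates.append(key.replace('.bn.', '.norm.'))
--
--     dedup = []
--     seen = set()
--     for key in candidates:
--         if key in seen: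
--             continue
--         seen.add(key)
--         dedup.append(key)
--
--     for key in dedup:
--         if key in jittor_state_dict:
--             return key
--     return None
-- ===== SOURCE B (Python) =====
-- def _default_param_mapping():
--     """Explicit PyTorch->Jittor key mapping."""
--     return {
--         'decode_head.conv_seg.weight': 'decode_head.cls_seg.weight',
--         'decode_head.conv_seg.bias': 'decode_head.cls_seg.bias',
--         'decode_head.squeeze.bn.weight': 'decode_head.squeeze.norm.weight',
--         'decode_head.squeeze.bn.bias': 'decode_head.squeeze.norm.bias',
--         'decode_head.squeeze.bn.running_mean':
--         'decode_head.squeeze.norm.running_mean',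
--         'decode_head.squeeze.bn.running_var':
--         'decode_head.squeeze.norm.running_var',
--         'decode_head.hamburger.ham_out.bn.weight':
--         'decode_head.hamburger.ham_out.norm.weight',
--         'decode_head.hamburger.ham_out.bn.bias':
--         'decode_head.hamburger.ham_out.norm.bias',
--         'decode_head.hamburger.ham_out.bn.running_mean':
--         'decode_head.hamburger.ham_out.norm.running_mean',
--         'decode_head.hamburger.ham_out.bn.running_var':
--         'decode_head.hamburger.ham_out.norm.running_var',
--         'decode_head.align.bn.weight': 'decode_head.align.norm.weight',
--         'decode_head.align.bn.bias': 'decode_head.align.norm.bias',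
--         'decode_head.align.bn.running_mean':
--         'decode_head.align.norm.running_mean',
--         'decode_head.align.bn.running_var': 'decode_head.align.norm.running_var',
--     }
--
--
-- def _variants(key, mapping):
--     """Candidate model keys for one base key, best first."""
--     out = [mapping[key]] if key in mapping else []
--     out.append(key)
--     for old, new in (('gamma_1', 'gamma1'), ('gamma_2', 'gamma2'),
--                      ('.bn.', '.norm.')):
--         if old in key:
--             out.append(key.replace(old, new))
--     return out
--
--
-- def _convert_param_name(src_key, jittor_state_dict):
--     """Convert checkpoint key to model key.
--
--     Inverted lookup: build a priority index candidate -> rank once, then make a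
--     single pass over the model's state dict keeping the best-ranked match.
--     """
--     if 'num_batches_tracked' in src_key:
--         return None
--     if any(x in src_key
--            for x in ['backbone.norm0', 'backbone.norm1', 'backbone.norm2',
--                      'backbone.norm3']):
--         return None
--
--     mapping = _default_param_mapping()
--     prefixes = ['module.', 'backbone.', 'module.backbone.', 'model.',
--                 'model.backbone.']
--     rank = {}
--     n = 0
--     for key in [src_key] + [src_key[len(p):] for p in prefixes
--                             if src_key.startswith(p)]:
--         for cand in _variants(key, mapping):
--             if cand not in rank:
--                 rank[cand] = n
--                 n += 1
--     best = None
--     for k in jittor_state_dict: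
--         r = rank.get(k)
--         if r is not None and (best is None or r < best[0]):
--             best = (r, k)
--     return None if best is None else best[1]
-- ===== Notes on version B (the rewrite author's own statement) =====
-- stated objective: alternative
-- what changed: B inverts the lookup direction: instead of A's three staged passes (build a full candidate list, dedup it with a seen-set, then test each candidate for dict membership), B builds a candidate->priority rank index once and makes a single pass over the state-dict keys, keeping the matching key of best rank.
import Mathlib
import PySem

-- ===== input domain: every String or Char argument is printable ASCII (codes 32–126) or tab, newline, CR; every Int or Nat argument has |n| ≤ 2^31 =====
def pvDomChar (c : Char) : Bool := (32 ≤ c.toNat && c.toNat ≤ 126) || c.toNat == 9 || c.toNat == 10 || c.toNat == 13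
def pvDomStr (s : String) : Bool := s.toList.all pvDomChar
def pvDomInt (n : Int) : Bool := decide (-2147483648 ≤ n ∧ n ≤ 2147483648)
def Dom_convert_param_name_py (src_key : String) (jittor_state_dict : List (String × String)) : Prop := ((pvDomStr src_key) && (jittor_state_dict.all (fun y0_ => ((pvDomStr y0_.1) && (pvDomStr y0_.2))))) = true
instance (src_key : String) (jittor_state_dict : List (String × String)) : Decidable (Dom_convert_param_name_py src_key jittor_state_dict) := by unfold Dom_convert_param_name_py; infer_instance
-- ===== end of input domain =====

-- B inverts the lookup: a candidate->priority rank index is built once, then ONE pass over the state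
-- dict keeps the best-ranked matching key — instead of A's candidates/dedup/scan passes; same return value.

-- shared module helper: _default_param_mapping (a dict literal both Pythons define identically)
def pvMapping : PySem.Dict String String := PySem.Dict.mk [
  ("decode_head.conv_seg.weight", "decode_head.cls_seg.weight"),
  ("decode_head.conv_seg.bias", "decode_head.cls_seg.bias"),
  ("decode_head.squeeze.bn.weight", "decode_head.squeeze.norm.weight"),
  ("decode_head.squeeze.bn.bias", "decode_head.squeeze.norm.bias"),
  ("decode_head.squeeze.bn.running_mean", "decode_head.squeeze.norm.running_mean"),
  ("decode_head.squeeze.bn.running_var", "decode_head.squeeze.norm.running_var"),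
  ("decode_head.hamburger.ham_out.bn.weight", "decode_head.hamburger.ham_out.norm.weight"),
  ("decode_head.hamburger.ham_out.bn.bias", "decode_head.hamburger.ham_out.norm.bias"),
  ("decode_head.hamburger.ham_out.bn.running_mean", "decode_head.hamburger.ham_out.norm.running_mean"),
  ("decode_head.hamburger.ham_out.bn.running_var", "decode_head.hamburger.ham_out.norm.running_var"),
  ("decode_head.align.bn.weight", "decode_head.align.norm.weight"),
  ("decode_head.align.bn.bias", "decode_head.align.norm.bias"),
  ("decode_head.align.bn.running_mean", "decode_head.align.norm.running_mean"),
  ("decode_head.align.bn.running_var", "decode_head.align.norm.running_var")]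

-- ===== PORT A =====
-- base_keys: src_key plus the prefix-stripped variants, each appended under its own startswith test
def pvBaseKeysA (src_key : String) : List String :=
  let bk := [src_key]
  let bk := if PySem.Str.startswith src_key "module." then bk ++ [PySem.Str.slice src_key (some 7) none] else bk
  let bk := if PySem.Str.startswith src_key "backbone." then bk ++ [PySem.Str.slice src_key (some 9) none] else bk
  let bk := if PySem.Str.startswith src_key "module.backbone." then bk ++ [PySem.Str.slice src_key (some 16) none] else bk
  let bk := if PySem.Str.startswith src_key "model." then bk ++ [PySem.Str.slice src_key (some 6) none] else bk
  let bk := if PySem.Str.startswith src_key "model.backbone." then bk ++ [PySem.Str.slice src_key (some 15) none] else bk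
  bk

-- the 'for key in base_keys' candidate-building loop body (appends to candidates)
def pvCandStepA (acc : List String) (key : String) : List String :=
  let acc := match pvMapping.get? key with | some v => acc ++ [v] | none => acc
  let acc := acc ++ [key]
  let acc := if PySem.Str.isIn "gamma_1" key then acc ++ [PySem.Str.replace key "gamma_1" "gamma1"] else acc
  let acc := if PySem.Str.isIn "gamma_2" key then acc ++ [PySem.Str.replace key "gamma_2" "gamma2"] else acc
  let acc := if PySem.Str.isIn ".bn." key then acc ++ [PySem.Str.replace key ".bn." ".norm."] else acc
  acc

-- the dedup loop with its 'seen' set and 'dedup' accumulator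
def pvDedupA (seen : PySem.Set String) (dedup : List String) : List String → List String
  | [] => dedup
  | k :: ks =>
      if PySem.Set.contains seen k then pvDedupA seen dedup ks
      else pvDedupA (PySem.Set.add seen k) (dedup ++ [k]) ks

-- the final 'for key in dedup: if key in jittor_state_dict: return key' loop
def pvScanA (jittor_state_dict : List (String × String)) : List String → Option String
  | [] => none
  | k :: ks =>
      if (PySem.Dict.mk jittor_state_dict).contains k then some k
      else pvScanA jittor_state_dict ks

def convert_param_name_py (src_key : String) (jittor_state_dict : List (String × String)) : Option String :=
  if PySem.Str.isIn "num_batches_tracked" src_key then none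
  else if ["backbone.norm0", "backbone.norm1", "backbone.norm2", "backbone.norm3"].any
            (fun x => PySem.Str.isIn x src_key) then none
  else
    let candidates := (pvBaseKeysA src_key).foldl pvCandStepA []
    pvScanA jittor_state_dict (pvDedupA PySem.Set.empty [] candidates)

-- ===== PORT B =====
def pvPrefixesB : List String := ["module.", "backbone.", "module.backbone.", "model.", "model.backbone."]

-- the (old, new) substitution pairs _variants loops over
def pvSubsB : List (String × String) := [("gamma_1", "gamma1"), ("gamma_2", "gamma2"), (".bn.", ".norm.")]

-- _variants: candidate model keys for one base key, best first
def pvVariantsB (key : String) : List String :=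
  let out := match pvMapping.get? key with | some v => [v] | none => []
  let out := out ++ [key]
  pvSubsB.foldl (fun out p => if PySem.Str.isIn p.1 key then out ++ [PySem.Str.replace key p.1 p.2] else out) out

-- 'if cand not in rank: rank[cand] = n; n += 1' (state = (rank, n))
def pvRankStepB (st : PySem.Dict String Int × Int) (cand : String) : PySem.Dict String Int × Int :=
  if st.1.contains cand then st else (st.1.insert cand st.2, st.2 + 1)

-- the nested rank-building loops
def pvRankB (base_keys : List String) : PySem.Dict String Int × Int :=
  base_keys.foldl (fun st key => (pvVariantsB key).foldl pvRankStepB st) (PySem.Dict.empty, 0)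

-- 'r = rank.get(k); if r is not None and (best is None or r < best[0]): best = (r, k)'
def pvBestStepB (rank : PySem.Dict String Int) (best : Option (Int × String)) (k : String) : Option (Int × String) :=
  match rank.get? k with
  | none => best
  | some r =>
      match best with
      | none => some (r, k)
      | some b => if r < b.1 then some (r, k) else best

def convert_param_name_py_alt (src_key : String) (jittor_state_dict : List (String × String)) : Option String :=
  if PySem.Str.isIn "num_batches_tracked" src_key then none
  else if ["backbone.norm0", "backbone.norm1", "backbone.norm2", "backbone.norm3"].any
            (fun x => PySem.Str.isIn x src_key) then none
  else
    let base_keys := src_key :: (pvPrefixesB.filter (fun p => PySem.Str.startswith src_key p)).map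
        (fun p => PySem.Str.slice src_key (some (PySem.Str.len p : Int)) none)
    let rank := (pvRankB base_keys).1
    -- 'for k in jittor_state_dict' iterates the dict's (distinct) keys in insertion order
    let best := ((PySem.Dict.ofList jittor_state_dict).keys).foldl (pvBestStepB rank) none
    match best with
    | none => none
    | some b => some b.2

-- ===== PRECONDITION & SPEC =====
def Spec_convert_param_name_py (src_key : String) (jittor_state_dict : List (String × String)) (out : Option String) : Prop := out = convert_param_name_py_alt src_key jittor_state_dict
instance (src_key : String) (jittor_state_dict : List (String × String)) (out : Option String) : Decidable (Spec_convert_param_name_py src_key jittor_state_dict out) := by unfold Spec_convert_param_name_py; infer_instance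

-- ===== CLAIM (what is proved, stated in full; the proofs are below) =====
def Claim_equal_convert_param_name_py : Prop := ∀ (src_key : String) (jittor_state_dict : List (String × String)), Dom_convert_param_name_py src_key jittor_state_dict → Spec_convert_param_name_py src_key jittor_state_dict (convert_param_name_py src_key jittor_state_dict)

-- ===== LEMMAS AND PROOFS =====

-- find? paired with the position (offset n) of the hit
def pvFindIdx (p : String → Bool) (n : Int) : List String → Option (Int × String)
  | [] => none
  | c :: cs => if p c then some (n, c) else pvFindIdx p (n + 1) cs

-- left-biased minimum by rank (the combine of B's best-loop)
def pvMerge (b x : Option (Int × String)) : Option (Int × String) :=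
  match b, x with
  | none, x => x
  | some b, none => some b
  | some b, some x => if x.1 < b.1 then some x else some b

-- first occurrences of a list, in order (the key list B's rank dict accumulates)
def pvFirsts (acc : List String) : List String → List String
  | [] => acc
  | c :: cs => pvFirsts (if acc.contains c then acc else acc ++ [c]) cs

-- ---- generic pvFindIdx facts ----
theorem pvFindIdx_map_snd (p : String → Bool) (l : List String) : ∀ n,
    (pvFindIdx p n l).map Prod.snd = l.find? p := by
  induction l with
  | nil => intro n; rfl
  | cons c cs ih =>
      intro n
      simp only [pvFindIdx, List.find?]
      cases p c <;> simp [ih]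

theorem pvFindIdx_le (p : String → Bool) (l : List String) : ∀ n q,
    pvFindIdx p n l = some q → n ≤ q.1 := by
  induction l with
  | nil => intro n q h; simp [pvFindIdx] at h
  | cons c cs ih =>
      intro n q h
      simp only [pvFindIdx] at h
      split at h
      · cases h; simp
      · have := ih (n + 1) q h; omega

theorem pvFindIdx_append (p : String → Bool) (l₁ l₂ : List String) : ∀ n,
    pvFindIdx p n (l₁ ++ l₂) = (pvFindIdx p n l₁).or (pvFindIdx p (n + l₁.length) l₂) := by
  induction l₁ with
  | nil => intro n; simp [pvFindIdx, Option.or]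
  | cons c cs ih =>
      intro n
      simp only [List.cons_append, pvFindIdx]
      cases p c
      · simp only [Bool.false_eq_true, if_false, ih (n + 1), List.length_cons]
        congr 2
        omega
      · simp [Option.or]

theorem pvFindIdx_congr (p q : String → Bool) (l : List String) (h : ∀ c ∈ l, p c = q c) : ∀ n,
    pvFindIdx p n l = pvFindIdx q n l := by
  induction l with
  | nil => intro n; rfl
  | cons c cs ih =>
      intro n
      have hc := h c (by simp)
      simp only [pvFindIdx, hc]
      cases q c
      · simp [ih (fun x hx => h x (by simp [hx]))]
      · rfl

theorem pvFindIdx_false (l : List String) : ∀ n, pvFindIdx (fun _ => false) n l = none := by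
  induction l with
  | nil => intro n; rfl
  | cons c cs ih => intro n; simp [pvFindIdx, ih]

theorem pvFindIdx_eq_none (p : String → Bool) (l : List String) (h : l.find? p = none) : ∀ n,
    pvFindIdx p n l = none := by
  intro n
  have := pvFindIdx_map_snd p l n
  rw [h] at this
  cases he : pvFindIdx p n l
  · rfl
  · rw [he] at this; simp at this

theorem pvFindIdx_beq_snd (k : String) (l : List String) : ∀ n q,
    pvFindIdx (fun c => c == k) n l = some q → q.2 = k := by
  induction l with
  | nil => intro n q h; simp [pvFindIdx] at h
  | cons c cs ih =>
      intro n q h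
      simp only [pvFindIdx] at h
      by_cases hck : (c == k) = true
      · rw [if_pos hck] at h; cases h; exact eq_of_beq hck
      · rw [if_neg hck] at h; exact ih (n + 1) q h

-- the first hit of a disjunction is the better-placed of the two hits
theorem pvFindIdx_or_merge (k : String) (q : String → Bool) (l : List String) : ∀ n,
    pvFindIdx (fun c => c == k || q c) n l
      = pvMerge (pvFindIdx (fun c => c == k) n l) (pvFindIdx q n l) := by
  induction l with
  | nil => intro n; rfl
  | cons c cs ih =>
      intro n
      simp only [pvFindIdx]
      by_cases hk : (c == k) = true
      · by_cases hq : q c = true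
        · simp [hk, hq, pvMerge]
        · have hq' : q c = false := by simpa using hq
          simp only [hk, hq', Bool.true_or, if_true, Bool.false_eq_true, if_false]
          cases he : pvFindIdx q (n + 1) cs
          · simp [pvMerge]
          · next x =>
              have := pvFindIdx_le q cs (n + 1) x he
              simp only [pvMerge]
              rw [if_neg (by omega)]
      · have hk' : (c == k) = false := by simpa using hk
        by_cases hq : q c = true
        · simp only [hk', hq, Bool.false_or, if_true, Bool.false_eq_true, if_false]
          cases he : pvFindIdx (fun c => c == k) (n + 1) cs
          · simp [pvMerge]
          · next x =>
              have := pvFindIdx_le (fun c => c == k) cs (n + 1) x he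
              simp only [pvMerge]
              rw [if_pos (by omega)]
        · have hq' : q c = false := by simpa using hq
          simp [hk', hq', ih (n + 1)]

-- ---- pvMerge / best-loop shape ----
theorem pvMerge_assoc (a b c : Option (Int × String)) :
    pvMerge (pvMerge a b) c = pvMerge a (pvMerge b c) := by
  rcases a with _ | a
  · rfl
  · rcases b with _ | b
    · rfl
    · rcases c with _ | c
      · by_cases h1 : b.1 < a.1 <;> simp [pvMerge, h1]
      · by_cases h1 : b.1 < a.1 <;> by_cases h2 : c.1 < b.1 <;> by_cases h3 : c.1 < a.1 <;>
          simp [pvMerge, h1, h2, h3] <;> first | rfl | omega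

theorem pvBestStepB_merge (rank : PySem.Dict String Int) (b : Option (Int × String)) (k : String) :
    pvBestStepB rank b k = pvMerge b (pvBestStepB rank none k) := by
  simp only [pvBestStepB]
  cases rank.get? k <;> cases b <;> simp [pvMerge]

theorem pvBest_foldl_merge (rank : PySem.Dict String Int) (ks : List String) : ∀ b,
    ks.foldl (pvBestStepB rank) b = pvMerge b (ks.foldl (pvBestStepB rank) none) := by
  induction ks with
  | nil => intro b; cases b <;> rfl
  | cons k ks ih =>
      intro b
      simp only [List.foldl_cons]
      rw [ih (pvBestStepB rank b k), ih (pvBestStepB rank none k),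
        pvBestStepB_merge rank b k, pvMerge_assoc]

-- ---- the rank dict is 'first index in pvFirsts of the candidate stream' ----
theorem pvRank_foldl_inv (cs : List String) :
    ∀ (d : PySem.Dict String Int) (n : Int) (l : List String),
    (∀ c, d.contains c = l.contains c) →
    (∀ c, d.get? c = (pvFindIdx (fun x => x == c) 0 l).map Prod.fst) →
    (n = (l.length : Int)) →
    ∀ c, ((cs.foldl pvRankStepB (d, n)).1).get? c
          = (pvFindIdx (fun x => x == c) 0 (pvFirsts l cs)).map Prod.fst := by
  induction cs with
  | nil => intro d n l _ hg _ c; simpa [pvFirsts] using hg c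
  | cons a cs ih =>
      intro d n l hc hg hn c
      simp only [List.foldl_cons, pvRankStepB, pvFirsts]
      rw [hc a]
      cases ha : l.contains a
      · simp only [Bool.false_eq_true, if_false]
        refine ih (d.insert a n) (n + 1) (l ++ [a]) ?_ ?_ ?_ c
        · intro x
          rw [PySem.Dict.contains_insert, hc x]
          simp [Bool.or_comm, Bool.beq_eq_decide_eq]
        · intro x
          rw [PySem.Dict.get?_insert, pvFindIdx_append]
          by_cases hx : x = a
          · subst hx
            have hnone : pvFindIdx (fun y => y == x) 0 l = none := by
              apply pvFindIdx_eq_none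
              rw [List.find?_eq_none]
              intro y hy hyx
              have : l.contains x = true := by
                rw [List.contains_iff_exists_mem_beq]; exact ⟨y, hy, by simp [eq_of_beq hyx]⟩
              rw [ha] at this; exact absurd this (by simp)
            simp [hnone, pvFindIdx, Option.or, hn]
          · have h2 : pvFindIdx (fun y => y == x) (0 + (l.length : Int)) [a] = none := by
              have hax : (a == x) = false := by
                rw [Bool.beq_eq_decide_eq]; exact decide_eq_false (fun h => hx h.symm)
              simp [pvFindIdx, hax]
            rw [if_neg hx, h2, hg x]
            cases pvFindIdx (fun y => y == x) 0 l <;> simp [Option.or]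
        · simp [hn]
      · simp only [if_true]
        exact ih d n l hc hg hn c

-- ---- B's best loop computes the best-placed candidate that is a dict key ----
theorem pvBest_eq_findIdx (rank : PySem.Dict String Int) (F : List String)
    (hr : ∀ c, rank.get? c = (pvFindIdx (fun x => x == c) 0 F).map Prod.fst)
    (ks : List String) :
    ks.foldl (pvBestStepB rank) none = pvFindIdx (fun c => ks.contains c) 0 F := by
  induction ks with
  | nil =>
      simp only [List.foldl_nil]
      rw [pvFindIdx_congr _ (fun _ => false) F (by intro c _; simp), pvFindIdx_false]
  | cons k ks ih =>
      simp only [List.foldl_cons]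
      rw [pvBest_foldl_merge, ih]
      have hs : pvBestStepB rank none k = pvFindIdx (fun c => c == k) 0 F := by
        simp only [pvBestStepB, hr k]
        cases he : pvFindIdx (fun x => x == k) 0 F
        · rfl
        · next q =>
            have := pvFindIdx_beq_snd k F 0 q he
            simp only [Option.map_some]
            rw [← this]
      rw [hs, ← pvFindIdx_or_merge]
      apply pvFindIdx_congr
      intro c _
      rw [List.contains_cons, Bool.beq_comm]

-- ---- A-side: scan is find?, candidates append per base key, dedup preserves the first hit ----
theorem pvScanA_eq_find? (jsd : List (String × String)) (l : List String) :
    pvScanA jsd l = l.find? (fun c => (PySem.Dict.mk jsd).contains c) := by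
  induction l with
  | nil => rfl
  | cons k ks ih =>
      simp only [pvScanA, List.find?]
      cases (PySem.Dict.mk jsd).contains k <;> simp [ih]

-- A's loop body appends exactly B's variant list
theorem pvCandStepA_eq (acc : List String) (key : String) :
    pvCandStepA acc key = acc ++ pvVariantsB key := by
  unfold pvCandStepA pvVariantsB pvSubsB
  simp only [List.foldl_cons, List.foldl_nil]
  cases pvMapping.get? key <;> split_ifs <;> simp

-- find? ignores extra exclusions of elements the predicate rejects
theorem find?_filter_and_ne (p : String → Bool) (c : String) (hc : p c = false)
    (q : String → Bool) (cs : List String) :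
    List.find? p (cs.filter (fun k => q k && !(k == c)))
      = List.find? p (cs.filter q) := by
  induction cs with
  | nil => rfl
  | cons a as ih =>
      by_cases hq : q a = true
      · by_cases hac : a = c
        · subst hac
          simp [hq, hc, ih]
        · have hne : (a == c) = false := by simp [hac]
          simp only [List.filter_cons, hq, hne, Bool.and_true, Bool.not_false, if_true,
            List.find?]
          cases hp : p a
          · simp [ih]
          · rfl
      · have hq' : q a = false := by simpa using hq
        simp [hq', ih]

-- the dedup loop prepends its accumulator
theorem pvDedupA_acc (cs : List String) : ∀ (seen : PySem.Set String) (dedup : List String),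
    pvDedupA seen dedup cs = dedup ++ pvDedupA seen [] cs := by
  induction cs with
  | nil => intro seen dedup; simp [pvDedupA]
  | cons k ks ih =>
      intro seen dedup
      simp only [pvDedupA, List.nil_append]
      cases h : PySem.Set.contains seen k
      · simp only [Bool.false_eq_true, if_false]
        rw [ih _ (dedup ++ [k]), ih _ [k]]
        simp
      · simp only [if_true]
        exact ih seen dedup

-- find? over the dedup of cs (w.r.t. 'seen') is find? over cs minus the seen elements
theorem find?_pvDedupA (p : String → Bool) (cs : List String) :
    ∀ (seen : PySem.Set String),
    (pvDedupA seen [] cs).find? p = (cs.filter (fun k => !(PySem.Set.contains seen k))).find? p := by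
  induction cs with
  | nil => intro seen; rfl
  | cons c ks ih =>
      intro seen
      simp only [pvDedupA, List.nil_append]
      cases h : PySem.Set.contains seen c
      · simp only [Bool.false_eq_true, if_false]
        rw [pvDedupA_acc ks (PySem.Set.add seen c) [c]]
        simp only [List.filter_cons, h, Bool.not_false, if_true, List.singleton_append,
          List.find?]
        cases hp : p c
        · rw [ih (PySem.Set.add seen c)]
          have hfilt : (ks.filter (fun k => !(PySem.Set.contains (PySem.Set.add seen c) k)))
              = ks.filter (fun k => (!(PySem.Set.contains seen k)) && !(k == c)) := by
            apply List.filter_congr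
            intro x _
            by_cases hx : x ∈ PySem.Set.add seen c
            · rcases (PySem.Set.mem_add seen c x).mp hx with hm | hm
              · simp [hm]
              · simp [hm]
            · have h3 : x ≠ c := fun he => hx (((PySem.Set.mem_add seen c x)).mpr (Or.inr he))
              simp [h3]
          rw [hfilt, find?_filter_and_ne p c hp]
        · simp
      · simp only [if_true]
        rw [ih seen, List.filter_cons]
        simp only [h, Bool.not_true, Bool.false_eq_true, if_false]

-- find? over the first-occurrence list is find? over the whole stream
theorem find?_pvFirsts (p : String → Bool) (cs : List String) : ∀ (l : List String),
    (pvFirsts l cs).find? p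
      = ((l.find? p).or ((cs.filter (fun c => !(l.contains c))).find? p)) := by
  induction cs with
  | nil =>
      intro l
      simp only [pvFirsts, List.filter_nil, List.find?_nil]
      cases l.find? p <;> simp [Option.or]
  | cons c ks ih =>
      intro l
      simp only [pvFirsts]
      cases hm : l.contains c
      · simp only [Bool.false_eq_true, if_false]
        rw [ih (l ++ [c])]
        simp only [List.find?_append, List.filter_cons, hm, Bool.not_false, if_true]
        have hsplit : ∀ x, ((l ++ [c]).contains x) = (l.contains x || x == c) := by
          intro x; simp [Bool.or_comm, Bool.beq_eq_decide_eq]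
        cases hp : p c
        · have hfind : [c].find? p = none := by simp [List.find?, hp]
          rw [hfind]
          have : (ks.filter (fun x => !((l ++ [c]).contains x)))
              = ks.filter (fun x => (!(l.contains x)) && !(x == c)) := by
            apply List.filter_congr; intro x _
            rw [hsplit x]; cases l.contains x <;> cases x == c <;> rfl
          rw [this, find?_filter_and_ne p c hp]
          simp only [List.find?]
          rw [hp]
          cases l.find? p <;> simp [Option.or]
        · have hfind : [c].find? p = some c := by simp [List.find?, hp]
          rw [hfind]
          simp only [List.find?]
          rw [hp]
          cases l.find? p <;> simp [Option.or]
      · simp only [if_true]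
        rw [ih l, List.filter_cons]
        simp only [hm, Bool.not_true, Bool.false_eq_true, if_false]

-- B's nested rank loops are one fold over the flattened candidate stream
theorem pvRankB_flat (bks : List String) :
    ∀ st, bks.foldl (fun st key => (pvVariantsB key).foldl pvRankStepB st) st
      = (bks.flatMap pvVariantsB).foldl pvRankStepB st := by
  induction bks with
  | nil => intro st; rfl
  | cons k ks ih => intro st; simp [List.flatMap_cons, List.foldl_append, ih]

-- the keys a Python dict built from the pairs iterates = the distinct first-occurrence keys;
-- membership among them is exactly 'key in dict'
theorem keys_ofList_contains (jsd : List (String × String)) (c : String) :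
    ((PySem.Dict.ofList jsd).keys).contains c = (PySem.Dict.mk jsd).contains c := by
  have hkeys : (PySem.Dict.ofList jsd).keys = PySem.Set.ofList (jsd.map Prod.fst) := by
    show (jsd.foldl (fun d p => d.insert p.1 p.2) PySem.Dict.empty).keys = _
    rw [PySem.Dict.keys_foldl_insert_key]
    rfl
  rw [hkeys]
  have hmk : (PySem.Dict.mk jsd).keys = jsd.map Prod.fst := rfl
  by_cases h : c ∈ jsd.map Prod.fst
  · have hl : c ∈ (PySem.Set.ofList (jsd.map Prod.fst) : List String) :=
      (PySem.Set.mem_ofList _ _).mpr h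
    have hr : (PySem.Dict.mk jsd).contains c = true :=
      (PySem.Dict.contains_iff_mem_keys _ _).mpr (by rw [hmk]; exact h)
    simp [hl, hr]
  · have hl : c ∉ (PySem.Set.ofList (jsd.map Prod.fst) : List String) :=
      fun hm => h ((PySem.Set.mem_ofList _ _).mp hm)
    have hr : (PySem.Dict.mk jsd).contains c = false := by
      cases hcc : (PySem.Dict.mk jsd).contains c
      · rfl
      · exact absurd (by rw [← hmk]; exact (PySem.Dict.contains_iff_mem_keys _ _).mp hcc) h
    simp [hl, hr]

-- A's and B's base-key lists coincide
theorem pvBaseKeys_eq (src_key : String) :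
    pvBaseKeysA src_key
      = src_key :: (pvPrefixesB.filter (fun p => PySem.Str.startswith src_key p)).map
          (fun p => PySem.Str.slice src_key (some (PySem.Str.len p : Int)) none) := by
  unfold pvBaseKeysA pvPrefixesB
  simp only [List.filter]
  split_ifs <;>
    simp_all [show "module.".length = 7 from rfl,
      show "backbone.".length = 9 from rfl,
      show "module.backbone.".length = 16 from rfl,
      show "model.".length = 6 from rfl,
      show "model.backbone.".length = 15 from rfl]

-- ===== VERDICT (by name: the statement is the Claim_ definition above) =====
theorem convert_param_name_py_spec : Claim_equal_convert_param_name_py := by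
  intro src_key jsd _
  unfold Spec_convert_param_name_py convert_param_name_py convert_param_name_py_alt
  split_ifs with h1 h2
  · rfl
  · rfl
  · dsimp only
    rw [← pvBaseKeys_eq]
    set bks := pvBaseKeysA src_key with hbks
    set cs := bks.flatMap pvVariantsB with hcs
    -- A side = cs.find? (· in dict)
    have hflat : bks.foldl pvCandStepA [] = cs := by
      have hfun : pvCandStepA = fun acc x => acc ++ pvVariantsB x := by
        funext acc x; exact pvCandStepA_eq acc x
      rw [hfun, PySem.List.foldl_append_eq_flatMap]
      simp [hcs]
    have hA : pvScanA jsd (pvDedupA PySem.Set.empty [] (bks.foldl pvCandStepA []))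
        = cs.find? (fun c => (PySem.Dict.mk jsd).contains c) := by
      rw [hflat, pvScanA_eq_find?, find?_pvDedupA]
      have hempty : ∀ k, PySem.Set.contains (PySem.Set.empty (α := String)) k = false := fun _ => rfl
      simp only [hempty, Bool.not_false, List.filter_true]
    -- B side = the same find?
    set F := pvFirsts [] cs with hF
    have hrank : ∀ c, ((pvRankB bks).1).get? c
        = (pvFindIdx (fun x => x == c) 0 F).map Prod.fst := by
      intro c
      unfold pvRankB
      rw [pvRankB_flat]
      exact pvRank_foldl_inv cs PySem.Dict.empty 0 [] (by intro x; rfl) (by intro x; rfl) rfl c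
    set ks := (PySem.Dict.ofList jsd).keys with hks
    have hB : ks.foldl (pvBestStepB (pvRankB bks).1) none
        = pvFindIdx (fun c => (PySem.Dict.mk jsd).contains c) 0 F := by
      rw [pvBest_eq_findIdx _ F hrank ks]
      apply pvFindIdx_congr
      intro c _
      rw [hks, keys_ofList_contains]
    have hBF : (pvFindIdx (fun c => (PySem.Dict.mk jsd).contains c) 0 F).map Prod.snd
        = cs.find? (fun c => (PySem.Dict.mk jsd).contains c) := by
      rw [pvFindIdx_map_snd, hF, find?_pvFirsts]
      simp only [List.find?_nil, Option.none_or]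
      have hfil : cs.filter (fun c => !(List.contains ([] : List String) c)) = cs := by simp
      rw [hfil]
    rw [hA, hB]
    cases he : pvFindIdx (fun c => (PySem.Dict.mk jsd).contains c) 0 F
    · rw [he] at hBF; simp only [Option.map_none] at hBF; rw [← hBF]
    · rw [he] at hBF; simp only [Option.map_some] at hBF; rw [← hBF]
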